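-- pv_equiv track=rewrite | github.com/harshjohar/CP | uass001/mystim.py | rec_in_sq
-- ===== SOURCE A (Python) =====
-- def good(mid, n, h, w):
--     return (mid//w) * (mid//h) >= n
--
-- def rec_in_sq(n,h,w):
--     lo = 0
--     hi = max(h,w)*n
--     ans = -1
--     while lo<=hi:
--         mid = (lo+hi)//2
--         if good(mid, n, h, w):
--             hi = mid-1
--             ans = mid
--         else:
--             lo = mid+1
--     return ans
-- ===== SOURCE B (Python) =====
-- def rec_in_sq(n, h, w):
--     # Smallest side of a square that holds n rectangles of size h x w, laid out
--     # in an axis-aligned grid of k columns by ceil(n/k) rows.  A side s holds a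
--     # k x r grid iff k <= s//w and r <= s//h, so it suffices to try the grid
--     # shapes with k or r at most ~sqrt(n): collect the sides they give (and the
--     # symmetric shapes), keep the ones that verify, and take the smallest.
--     cands = []
--     k = 1
--     while (k - 1) * (k - 1) <= n:
--         r = -(-n // k)  # rows needed for k columns (and vice versa)
--         for s in (k * w, k * h, r * w, r * h):
--             if (s // w) * (s // h) >= n:
--                 cands.append(s)
--         k += 1
--     return min(cands, default=-1)
-- ===== Notes on version B (the rewrite author's own statement) =====
-- stated objective: alternative
-- what changed: Replaces A's binary search over side lengths by direct candidate generation: for each grid shape with k columns or k rows (k up to ~sqrt(n)) it collects the side lengths k*w, k*h, ceil(n/k)*w, ceil(n/k)*h that verify the packing inequality and returns the smallest collected side (min with default -1); Pre_ excludes inputs with a nonpositive rectangle dimension (except the negative-n/empty-range case), where A's feasibility predicate is not monotone and its binary-search result is accidental.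
-- outside the precondition, e.g. on rec_in_sq(4, -1, -1): A returns -1, B returns -4; on rec_in_sq(-2, -3, -4): A returns 0, B returns -1; on rec_in_sq(0, -1, -1): A returns 0, B returns -1
import Mathlib
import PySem

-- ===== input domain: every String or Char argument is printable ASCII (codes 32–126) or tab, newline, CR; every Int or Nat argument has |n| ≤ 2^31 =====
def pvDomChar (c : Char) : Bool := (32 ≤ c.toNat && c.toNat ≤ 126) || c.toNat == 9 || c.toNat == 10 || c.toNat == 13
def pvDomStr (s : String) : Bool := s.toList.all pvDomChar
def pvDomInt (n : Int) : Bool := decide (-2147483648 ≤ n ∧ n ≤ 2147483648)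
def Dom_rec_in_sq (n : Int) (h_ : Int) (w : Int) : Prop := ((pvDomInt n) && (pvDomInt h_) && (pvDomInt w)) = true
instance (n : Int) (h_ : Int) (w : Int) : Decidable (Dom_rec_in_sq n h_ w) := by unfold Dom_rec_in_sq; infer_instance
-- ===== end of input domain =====

-- B replaces A's binary search over side lengths by candidate generation: the
-- grid shapes with k columns or k rows (k up to ~sqrt(n)) yield candidate
-- sides, the ones that verify the packing inequality are collected, and the
-- smallest is returned; equal return values are proved on Pre_.


-- ===== PORT A =====
-- good(mid, n, h, w) = (mid//w) * (mid//h) >= n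
def pvGood (mid n h w : Int) : Bool :=
  decide (n ≤ PySem.Int.floordiv mid w * PySem.Int.floordiv mid h)

-- mid = (lo + hi) // 2
def pvMid (lo hi : Int) : Int := PySem.Int.floordiv (lo + hi) 2

-- the while-loop of A, state (lo, hi, ans)
def pvLoopA (n h w lo hi ans : Int) : Int :=
  if hlh : lo ≤ hi then
    if pvGood (pvMid lo hi) n h w then pvLoopA n h w lo (pvMid lo hi - 1) (pvMid lo hi)
    else pvLoopA n h w (pvMid lo hi + 1) hi ans
  else ans
termination_by (hi + 1 - lo).toNat
decreasing_by
  · have := PySem.Int.floordiv_two_mid_bounds hlh; unfold pvMid; omega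
  · have := PySem.Int.floordiv_two_mid_bounds hlh; unfold pvMid; omega

def rec_in_sq (n : Int) (h_ : Int) (w : Int) : Int :=
  pvLoopA n h_ w 0 (max h_ w * n) (-1)

-- ===== PORT B =====
-- r = -(-n // k)  (= ceil(n / k))
def pvCeil (n k : Int) : Int := -(PySem.Int.floordiv (-n) k)

-- (s // w) * (s // h) >= n
def pvFits (n h w s : Int) : Bool :=
  decide (n ≤ PySem.Int.floordiv s w * PySem.Int.floordiv s h)

-- the candidates appended at step k: the sides s in (k*w, k*h, r*w, r*h)
-- passing the verification test
def pvStep (n h w k : Int) : List Int :=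
  List.filter (fun s => pvFits n h w s)
    [k * w, k * h, pvCeil n k * w, pvCeil n k * h]

-- the while-loop of B, state (k, cands)
def pvLoopB (n h w k : Int) (cands : List Int) : List Int :=
  if _hc : (k - 1) * (k - 1) ≤ n then
    pvLoopB n h w (k + 1) (cands ++ pvStep n h w k)
  else cands
termination_by (n + 2 - k).toNat
decreasing_by
  rcases (by omega : k ≤ 1 ∨ 2 ≤ k) with h1 | h1
  · have h0 : 0 ≤ (k - 1) * (k - 1) := mul_self_nonneg _
    omega
  · have h2 : 0 ≤ (k - 1) * (k - 2) := mul_nonneg (by omega) (by omega)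
    have h3 : (k - 1) * (k - 1) - (k - 1) * (k - 2) = k - 1 := by ring
    omega

-- min(cands, default=-1)
def rec_in_sq_alt (n : Int) (h_ : Int) (w : Int) : Int :=
  match PySem.List.min? (pvLoopB n h_ w 1 []) (fun s => s) with
  | some m => m
  | none => -1

-- ===== PRECONDITION & SPEC =====
-- Pre_ keeps the natural domain (positive rectangle dimensions, any n) plus
-- every negative n whose search range is empty; it excludes h = 0 or w = 0 with
-- a nonnegative search bound, where A raises ZeroDivisionError, and the inputs
-- with a nonpositive dimension where A's predicate is not monotone and its
-- binary-search result is accidental.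
def Pre_rec_in_sq (n : Int) (h_ : Int) (w : Int) : Prop :=
  (1 ≤ h_ ∧ 1 ≤ w) ∨ (n < 0 ∧ 0 < max h_ w)
instance (n : Int) (h_ : Int) (w : Int) : Decidable (Pre_rec_in_sq n h_ w) := by
  unfold Pre_rec_in_sq; infer_instance

def pvWitness_rec_in_sq : Int × Int × Int := (3, 2, 2)

def Spec_rec_in_sq (n : Int) (h_ : Int) (w : Int) (out : Int) : Prop := out = rec_in_sq_alt n h_ w
instance (n : Int) (h_ : Int) (w : Int) (out : Int) : Decidable (Spec_rec_in_sq n h_ w out) := by unfold Spec_rec_in_sq; infer_instance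

-- ===== CLAIM (what is proved, stated in full; the proofs are below) =====
def Claim_equal_rec_in_sq : Prop := ∀ (n : Int) (h_ : Int) (w : Int), Dom_rec_in_sq n h_ w → Pre_rec_in_sq n h_ w → Spec_rec_in_sq n h_ w (rec_in_sq n h_ w)

-- ===== LEMMAS AND PROOFS =====

-- proof-side abbreviations: the two grid-bound sides at step k
def pvC1 (n h w t : Int) : Int := max (t * w) (pvCeil n t * h)
def pvC2 (n h w t : Int) : Int := max (pvCeil n t * w) (t * h)

-- ceil bracket: for 0 < a, (ceil(n/a) - 1) * a < n ∧ n ≤ ceil(n/a) * a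
theorem pvCeil_bracket {n a : Int} (ha : 0 < a) :
    (pvCeil n a - 1) * a < n ∧ n ≤ pvCeil n a * a := by
  have := (PySem.Int.neg_floordiv_neg_eq_iff_of_pos (a := n) (b := a) ha
    (q := pvCeil n a)).mp rfl
  exact this

theorem pvCeil_le_iff {n a q : Int} (ha : 0 < a) : pvCeil n a ≤ q ↔ n ≤ q * a := by
  obtain ⟨hlt, hle⟩ := pvCeil_bracket (n := n) ha
  constructor
  · intro hq
    calc n ≤ pvCeil n a * a := hle
    _ ≤ q * a := by exact mul_le_mul_of_nonneg_right hq (le_of_lt ha)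
  · intro hq
    by_contra hq'
    have : q * a ≤ (pvCeil n a - 1) * a :=
      mul_le_mul_of_nonneg_right (by omega) (le_of_lt ha)
    omega

-- floordiv brackets for a positive divisor
theorem pvFdiv_mul_le {s b : Int} (hb : 0 < b) : PySem.Int.floordiv s b * b ≤ s :=
  ((PySem.Int.le_floordiv_iff_mul_le (a := s) (b := b) (q := PySem.Int.floordiv s b) hb).mp
    le_rfl)

theorem pvFdiv_nonneg {s b : Int} (hb : 0 < b) (hs : 0 ≤ s) :
    0 ≤ PySem.Int.floordiv s b := by
  rw [PySem.Int.floordiv_eq_ediv_of_pos hb]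
  exact Int.ediv_nonneg hs (le_of_lt hb)

theorem pvFdiv_mono {s s' b : Int} (hb : 0 < b) (h : s ≤ s') :
    PySem.Int.floordiv s b ≤ PySem.Int.floordiv s' b := by
  rw [PySem.Int.floordiv_eq_ediv_of_pos hb, PySem.Int.floordiv_eq_ediv_of_pos hb]
  exact Int.ediv_le_ediv hb h

theorem pvFdiv_mul_cancel {a b : Int} (hb : 0 < b) :
    PySem.Int.floordiv (a * b) b = a := by
  rw [PySem.Int.floordiv_eq_ediv_of_pos hb]
  exact Int.mul_ediv_cancel a (by omega)

-- monotonicity of the predicate on nonnegative sides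
theorem pvGood_mono {n h w s s' : Int} (hh : 1 ≤ h) (hw : 1 ≤ w)
    (hs : 0 ≤ s) (hss : s ≤ s') (hg : pvGood s n h w = true) :
    pvGood s' n h w = true := by
  simp only [pvGood, decide_eq_true_eq] at hg ⊢
  have h1 := pvFdiv_mono (s := s) (s' := s') (b := w) (by omega) hss
  have h2 := pvFdiv_mono (s := s) (s' := s') (b := h) (by omega) hss
  have h3 := pvFdiv_nonneg (s := s) (b := w) (by omega) hs
  have h4 := pvFdiv_nonneg (s := s) (b := h) (by omega) hs
  calc n ≤ PySem.Int.floordiv s w * PySem.Int.floordiv s h := hg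
  _ ≤ PySem.Int.floordiv s' w * PySem.Int.floordiv s' h := by
      exact mul_le_mul h1 h2 h4 (by omega)

-- any a×b grid with a*b ≥ n gives a feasible side max(a*w, b*h)
theorem pvCand_good {n h w a b : Int} (hh : 1 ≤ h) (hw : 1 ≤ w)
    (ha : 1 ≤ a) (hb : 1 ≤ b) (hab : n ≤ a * b) :
    pvGood (max (a * w) (b * h)) n h w = true := by
  simp only [pvGood, decide_eq_true_eq]
  have h1 : a ≤ PySem.Int.floordiv (max (a * w) (b * h)) w := by
    rw [PySem.Int.le_floordiv_iff_mul_le (by omega)]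
    exact le_max_left _ _
  have h2 : b ≤ PySem.Int.floordiv (max (a * w) (b * h)) h := by
    rw [PySem.Int.le_floordiv_iff_mul_le (by omega)]
    exact le_max_right _ _
  calc n ≤ a * b := hab
  _ ≤ _ := mul_le_mul h1 h2 (by omega) (by omega)

-- feasibility forces both quotients ≥ 1 (for n ≥ 1)
theorem pvGood_elim {n h w s : Int} (hn : 1 ≤ n) (hh : 1 ≤ h) (hw : 1 ≤ w)
    (hs : 0 ≤ s) (hg : pvGood s n h w = true) :
    1 ≤ PySem.Int.floordiv s w ∧ 1 ≤ PySem.Int.floordiv s h := by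
  simp only [pvGood, decide_eq_true_eq] at hg
  have h3 := pvFdiv_nonneg (s := s) (b := w) (by omega) hs
  have h4 := pvFdiv_nonneg (s := s) (b := h) (by omega) hs
  constructor
  · by_contra hc
    have : PySem.Int.floordiv s w = 0 := by omega
    rw [this] at hg; simp at hg; omega
  · by_contra hc
    have : PySem.Int.floordiv s h = 0 := by omega
    rw [this] at hg; simp at hg; omega

-- pvFits is the same test as pvGood
theorem pvFits_eq (n h w s : Int) : pvFits n h w s = pvGood s n h w := rfl

-- membership in the B loop's accumulated candidate list
theorem pvLoopB_mem (n h w : Int) : ∀ (k : Int) (acc : List Int) (x : Int), 1 ≤ k →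
    (x ∈ pvLoopB n h w k acc ↔
      x ∈ acc ∨ ∃ u, k ≤ u ∧ (u - 1) * (u - 1) ≤ n ∧ x ∈ pvStep n h w u) := by
  have key : ∀ (f : Nat) (k : Int) (acc : List Int) (x : Int), (n + 2 - k).toNat ≤ f → 1 ≤ k →
      (x ∈ pvLoopB n h w k acc ↔
        x ∈ acc ∨ ∃ u, k ≤ u ∧ (u - 1) * (u - 1) ≤ n ∧ x ∈ pvStep n h w u) := by
    intro f
    induction f with
    | zero =>
      intro k acc x hf hk
      have hstop : ∀ u : Int, k ≤ u → ¬ (u - 1) * (u - 1) ≤ n := by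
        intro u hu hc
        rcases (by omega : u ≤ 1 ∨ 2 ≤ u) with h1 | h1
        · have h0 : 0 ≤ (u - 1) * (u - 1) := mul_self_nonneg _
          omega
        · have h2 : 0 ≤ (u - 1) * (u - 2) := mul_nonneg (by omega) (by omega)
          have h3 : (u - 1) * (u - 1) - (u - 1) * (u - 2) = u - 1 := by ring
          omega
      rw [pvLoopB, dif_neg (hstop k le_rfl)]
      constructor
      · exact Or.inl
      · rintro (hx | ⟨u, hu, hun, -⟩)
        · exact hx
        · exact absurd hun (hstop u hu)
    | succ f ih =>
      intro k acc x hf hk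
      by_cases hc : (k - 1) * (k - 1) ≤ n
      · have hkn : k ≤ n + 1 := by
          rcases (by omega : k ≤ 1 ∨ 2 ≤ k) with h1 | h1
          · have h0 : 0 ≤ (k - 1) * (k - 1) := mul_self_nonneg _
            omega
          · have h2 : 0 ≤ (k - 1) * (k - 2) := mul_nonneg (by omega) (by omega)
            have h3 : (k - 1) * (k - 1) - (k - 1) * (k - 2) = k - 1 := by ring
            omega
        rw [pvLoopB, dif_pos hc, ih (k + 1) (acc ++ pvStep n h w k) x (by omega) (by omega)]
        constructor
        · rintro (hx | ⟨u, hu, hun, hmem⟩)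
          · rcases List.mem_append.mp hx with hx | hx
            · exact Or.inl hx
            · exact Or.inr ⟨k, le_rfl, hc, hx⟩
          · exact Or.inr ⟨u, by omega, hun, hmem⟩
        · rintro (hx | ⟨u, hu, hun, hmem⟩)
          · exact Or.inl (List.mem_append.mpr (Or.inl hx))
          · rcases (by omega : u = k ∨ k + 1 ≤ u) with rfl | hlt
            · exact Or.inl (List.mem_append.mpr (Or.inr hmem))
            · exact Or.inr ⟨u, hlt, hun, hmem⟩
      · rw [pvLoopB, dif_neg hc]
        constructor
        · exact Or.inl
        · rintro (hx | ⟨u, hu, hun, -⟩)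
          · exact hx
          · exfalso
            have h1 : (k - 1) * (k - 1) ≤ (u - 1) * (u - 1) :=
              mul_le_mul (by omega) (by omega) (by omega) (by omega)
            omega
  intro k acc x hk
  exact key (n + 2 - k).toNat k acc x le_rfl hk

-- the binary search returns m whenever the predicate is "s ≥ m" on s ≥ 0
theorem pvLoopA_eq (n h w m : Int) (hm : 0 ≤ m)
    (hchar : ∀ s, 0 ≤ s → (pvGood s n h w = true ↔ m ≤ s)) :
    ∀ lo hi ans, 0 ≤ lo → lo ≤ m →
      ((ans = -1 ∧ m ≤ hi) ∨ (ans = hi + 1 ∧ m ≤ ans)) →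
      pvLoopA n h w lo hi ans = m := by
  have key : ∀ (k : Nat) (lo hi ans : Int), (hi + 1 - lo).toNat ≤ k → 0 ≤ lo → lo ≤ m →
      ((ans = -1 ∧ m ≤ hi) ∨ (ans = hi + 1 ∧ m ≤ ans)) →
      pvLoopA n h w lo hi ans = m := by
    intro k
    induction k with
    | zero =>
      intro lo hi ans hk h0 hlm hbr
      have hnl : ¬ lo ≤ hi := by omega
      rw [pvLoopA, dif_neg hnl]
      rcases hbr with ⟨ha, hmh⟩ | ⟨ha, hmh⟩ <;> omega
    | succ k ih =>
      intro lo hi ans hk h0 hlm hbr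
      by_cases hlh : lo ≤ hi
      · rw [pvLoopA, dif_pos hlh]
        have hmid : lo ≤ pvMid lo hi ∧ pvMid lo hi ≤ hi :=
          PySem.Int.floordiv_two_mid_bounds hlh
        by_cases hg : pvGood (pvMid lo hi) n h w = true
        · rw [if_pos hg]
          have hmle : m ≤ pvMid lo hi := (hchar (pvMid lo hi) (by omega)).mp hg
          exact ih lo (pvMid lo hi - 1) (pvMid lo hi) (by omega) h0 hlm
            (Or.inr ⟨by omega, hmle⟩)
        · rw [if_neg hg]
          have hmgt : ¬ m ≤ pvMid lo hi := fun hmm =>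
            hg ((hchar (pvMid lo hi) (by omega)).mpr hmm)
          exact ih (pvMid lo hi + 1) hi ans (by omega) (by omega) (by omega) hbr
      · rw [pvLoopA, dif_neg hlh]
        rcases hbr with ⟨ha, hmh⟩ | ⟨ha, hmh⟩ <;> omega
  intro lo hi ans h0 hlm hbr
  exact key (hi + 1 - lo).toNat lo hi ans le_rfl h0 hlm hbr

theorem pvCeil_one (n : Int) : pvCeil n 1 = n := by
  have := pvCeil_bracket (n := n) (a := (1:Int)) one_pos
  omega

theorem pvCeil_pos {n a : Int} (ha : 0 < a) (hn : 1 ≤ n) : 1 ≤ pvCeil n a := by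
  by_contra hcon
  have h2 : n ≤ 0 * a := (pvCeil_le_iff ha).mp (by omega)
  simp at h2; omega

theorem pvCeil_nonneg {n a : Int} (ha : 0 < a) (hn : 0 ≤ n) : 0 ≤ pvCeil n a := by
  by_contra hcon
  have h2 : n ≤ (-1) * a := (pvCeil_le_iff ha).mp (by omega)
  omega

theorem pvC1_good {n h w u : Int} (hn : 1 ≤ n) (hh : 1 ≤ h) (hw : 1 ≤ w)
    (hu : 1 ≤ u) : pvGood (pvC1 n h w u) n h w = true := by
  have hb : 1 ≤ pvCeil n u := pvCeil_pos (by omega) hn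
  have hbr := pvCeil_bracket (n := n) (a := u) (by omega)
  simp only [pvC1]
  exact pvCand_good hh hw hu hb (by rw [mul_comm]; exact hbr.2)

theorem pvC2_good {n h w u : Int} (hn : 1 ≤ n) (hh : 1 ≤ h) (hw : 1 ≤ w)
    (hu : 1 ≤ u) : pvGood (pvC2 n h w u) n h w = true := by
  have hb : 1 ≤ pvCeil n u := pvCeil_pos (by omega) hn
  have hbr := pvCeil_bracket (n := n) (a := u) (by omega)
  simp only [pvC2]
  exact pvCand_good hh hw hb hu hbr.2

-- a verified candidate below the search bound exists at step 1 (n ≥ 0)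
theorem exists_step1 {n h w : Int} (hn : 0 ≤ n) (hh : 1 ≤ h) (hw : 1 ≤ w) :
    ∃ c, c ∈ pvStep n h w 1 ∧ c ≤ max h w * n := by
  rcases (by omega : n = 0 ∨ 1 ≤ n) with rfl | hn1
  · refine ⟨pvCeil 0 1 * h, ?_, ?_⟩
    · simp only [pvStep, List.mem_filter]
      refine ⟨by simp, ?_⟩
      rw [pvCeil_one]
      simp only [pvFits, zero_mul, decide_eq_true_eq]
      have h1 : PySem.Int.floordiv 0 w = 0 := by
        have := pvFdiv_mul_cancel (a := 0) (b := w) (by omega); simpa using this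
      have h2 : PySem.Int.floordiv 0 h = 0 := by
        have := pvFdiv_mul_cancel (a := 0) (b := h) (by omega); simpa using this
      rw [h1, h2]; norm_num
    · rw [pvCeil_one]; norm_num
  · by_cases hcase : w ≤ n * h
    · refine ⟨pvCeil n 1 * h, ?_, ?_⟩
      · simp only [pvStep, List.mem_filter]
        refine ⟨by simp, ?_⟩
        rw [pvCeil_one]
        simp only [pvFits, decide_eq_true_eq]
        have h1 : 1 ≤ PySem.Int.floordiv (n * h) w := by
          rw [PySem.Int.le_floordiv_iff_mul_le (by omega)]; omega
        have h2 : PySem.Int.floordiv (n * h) h = n := pvFdiv_mul_cancel (by omega)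
        rw [h2]
        calc n = 1 * n := (one_mul n).symm
        _ ≤ PySem.Int.floordiv (n * h) w * n :=
          mul_le_mul_of_nonneg_right h1 (by omega)
      · rw [pvCeil_one]
        calc n * h = h * n := mul_comm n h
        _ ≤ max h w * n := mul_le_mul_of_nonneg_right (le_max_left h w) (by omega)
    · refine ⟨1 * w, ?_, ?_⟩
      · simp only [pvStep, List.mem_filter]
        refine ⟨by simp, ?_⟩
        simp only [pvFits, one_mul, decide_eq_true_eq]
        have h1 : PySem.Int.floordiv w w = 1 := by
          have := pvFdiv_mul_cancel (a := 1) (b := w) (by omega); simpa using this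
        have h2 : n ≤ PySem.Int.floordiv w h := by
          rw [PySem.Int.le_floordiv_iff_mul_le (by omega)]; omega
        rw [h1, one_mul]; exact h2
      · rw [one_mul]
        calc w ≤ max h w := le_max_right h w
        _ = max h w * 1 := (mul_one _).symm
        _ ≤ max h w * n :=
          mul_le_mul_of_nonneg_left hn1 (le_trans (by omega) (le_max_right h w))

-- every collected candidate is nonnegative and verified (n ≥ 0)
theorem mem_loopB_facts {n h w x : Int} (hn : 0 ≤ n) (hh : 1 ≤ h) (hw : 1 ≤ w)
    (hx : x ∈ pvLoopB n h w 1 []) :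
    0 ≤ x ∧ pvGood x n h w = true := by
  rcases (pvLoopB_mem n h w 1 [] x le_rfl).mp hx with hemp | ⟨u, hu, hun, hmem⟩
  · simp at hemp
  · simp only [pvStep, List.mem_filter] at hmem
    obtain ⟨hraw, hfit⟩ := hmem
    refine ⟨?_, by rw [← pvFits_eq]; exact hfit⟩
    have hc : 0 ≤ pvCeil n u := pvCeil_nonneg (by omega) hn
    simp only [List.mem_cons, List.not_mem_nil, or_false] at hraw
    rcases hraw with rfl | rfl | rfl | rfl
    · exact mul_nonneg (by omega) (by omega)
    · exact mul_nonneg (by omega) (by omega)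
    · exact mul_nonneg hc (by omega)
    · exact mul_nonneg hc (by omega)

-- the returned minimum is below both grid-bound sides of every visited step
theorem m_le_pvC {n h w m : Int} (hn : 1 ≤ n) (hh : 1 ≤ h) (hw : 1 ≤ w)
    (hmin : PySem.List.min? (pvLoopB n h w 1 []) (fun s => s) = some m)
    {u : Int} (hu : 1 ≤ u) (hun : (u - 1) * (u - 1) ≤ n) :
    m ≤ pvC1 n h w u ∧ m ≤ pvC2 n h w u := by
  have hmemC : ∀ c : Int, (c = u * w ∨ c = u * h ∨ c = pvCeil n u * w ∨ c = pvCeil n u * h) →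
      pvGood c n h w = true → m ≤ c := by
    intro c hraw hg
    have hstep : c ∈ pvStep n h w u := by
      simp only [pvStep, List.mem_filter, List.mem_cons, List.not_mem_nil, or_false]
      exact ⟨hraw, by rw [pvFits_eq]; exact hg⟩
    have hL : c ∈ pvLoopB n h w 1 [] :=
      (pvLoopB_mem n h w 1 [] c le_rfl).mpr (Or.inr ⟨u, hu, hun, hstep⟩)
    exact PySem.List.min?_isMin hmin c hL
  constructor
  · have hg := pvC1_good hn hh hw hu
    rcases max_choice (u * w) (pvCeil n u * h) with hmx | hmx
    · rw [pvC1, hmx]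
      exact hmemC _ (Or.inl rfl) (by rw [pvC1, hmx] at hg; exact hg)
    · rw [pvC1, hmx]
      exact hmemC _ (Or.inr (Or.inr (Or.inr rfl))) (by rw [pvC1, hmx] at hg; exact hg)
  · have hg := pvC2_good hn hh hw hu
    rcases max_choice (pvCeil n u * w) (u * h) with hmx | hmx
    · rw [pvC2, hmx]
      exact hmemC _ (Or.inr (Or.inr (Or.inl rfl))) (by rw [pvC2, hmx] at hg; exact hg)
    · rw [pvC2, hmx]
      exact hmemC _ (Or.inr (Or.inl rfl)) (by rw [pvC2, hmx] at hg; exact hg)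

-- minimality: the returned minimum is below every verified side (n ≥ 1)
theorem alt_min {n h w m : Int} (hn : 1 ≤ n) (hh : 1 ≤ h) (hw : 1 ≤ w)
    (hmin : PySem.List.min? (pvLoopB n h w 1 []) (fun s => s) = some m) :
    ∀ s, 0 ≤ s → pvGood s n h w = true → m ≤ s := by
  intro s hs hg
  obtain ⟨hp1, hq1⟩ := pvGood_elim hn hh hw hs hg
  simp only [pvGood, decide_eq_true_eq] at hg
  set p := PySem.Int.floordiv s w with hpdef
  set q := PySem.Int.floordiv s h with hqdef
  have hpw : p * w ≤ s := pvFdiv_mul_le (by omega)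
  have hqh : q * h ≤ s := pvFdiv_mul_le (by omega)
  rcases le_total p q with hle | hle
  · by_cases hcase : (p - 1) * (p - 1) ≤ n
    · have hkey := (m_le_pvC hn hh hw hmin (by omega) hcase).1
      have hcle : pvC1 n h w p ≤ s := by
        simp only [pvC1]
        apply max_le hpw
        have h1 : pvCeil n p ≤ q := (pvCeil_le_iff (by omega)).mpr (by rw [mul_comm]; exact hg)
        calc pvCeil n p * h ≤ q * h := mul_le_mul_of_nonneg_right h1 (by omega)
        _ ≤ s := hqh
      exact le_trans hkey hcle
    · have hup : pvCeil n q ≤ p := (pvCeil_le_iff (by omega)).mpr hg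
      have hu1 : 1 ≤ pvCeil n q := pvCeil_pos (by omega) hn
      have hbr := pvCeil_bracket (n := n) (a := q) (by omega)
      have hun : (pvCeil n q - 1) * (pvCeil n q - 1) ≤ n := by
        have h2 : (pvCeil n q - 1) * (pvCeil n q - 1) ≤ (pvCeil n q - 1) * q :=
          mul_le_mul_of_nonneg_left (by omega) (by omega)
        omega
      have hkey := (m_le_pvC hn hh hw hmin (by omega) hun).1
      have hcle : pvC1 n h w (pvCeil n q) ≤ s := by
        simp only [pvC1]
        apply max_le
        · calc pvCeil n q * w ≤ p * w := mul_le_mul_of_nonneg_right hup (by omega)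
          _ ≤ s := hpw
        · have h1 : pvCeil n (pvCeil n q) ≤ q :=
            (pvCeil_le_iff (by omega)).mpr (by rw [mul_comm]; exact hbr.2)
          calc pvCeil n (pvCeil n q) * h ≤ q * h := mul_le_mul_of_nonneg_right h1 (by omega)
          _ ≤ s := hqh
      exact le_trans hkey hcle
  · by_cases hcase : (q - 1) * (q - 1) ≤ n
    · have hkey := (m_le_pvC hn hh hw hmin (by omega) hcase).2
      have hcle : pvC2 n h w q ≤ s := by
        simp only [pvC2]
        apply max_le
        · have h1 : pvCeil n q ≤ p := (pvCeil_le_iff (by omega)).mpr hg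
          calc pvCeil n q * w ≤ p * w := mul_le_mul_of_nonneg_right h1 (by omega)
          _ ≤ s := hpw
        · exact hqh
      exact le_trans hkey hcle
    · have hup : pvCeil n p ≤ q := (pvCeil_le_iff (by omega)).mpr (by rw [mul_comm]; exact hg)
      have hu1 : 1 ≤ pvCeil n p := pvCeil_pos (by omega) hn
      have hbr := pvCeil_bracket (n := n) (a := p) (by omega)
      have hun : (pvCeil n p - 1) * (pvCeil n p - 1) ≤ n := by
        have h2 : (pvCeil n p - 1) * (pvCeil n p - 1) ≤ (pvCeil n p - 1) * p :=
          mul_le_mul_of_nonneg_left (by omega) (by omega)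
        omega
      have hkey := (m_le_pvC hn hh hw hmin (by omega) hun).2
      have hcle : pvC2 n h w (pvCeil n p) ≤ s := by
        simp only [pvC2]
        apply max_le
        · have h1 : pvCeil n (pvCeil n p) ≤ p :=
            (pvCeil_le_iff (by omega)).mpr (by rw [mul_comm]; exact hbr.2)
          calc pvCeil n (pvCeil n p) * w ≤ p * w := mul_le_mul_of_nonneg_right h1 (by omega)
          _ ≤ s := hpw
        · calc pvCeil n p * h ≤ q * h := mul_le_mul_of_nonneg_right hup (by omega)
          _ ≤ s := hqh
      exact le_trans hkey hcle

-- ===== VERDICT (by name: the statement is the Claim_ definition above) =====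
theorem rec_in_sq_spec : Claim_equal_rec_in_sq := by
  intro n h_ w hdom hpre
  unfold Spec_rec_in_sq
  rcases (by omega : n < 0 ∨ 0 ≤ n) with hn | hn
  · have hmax : 0 < max h_ w := by
      rcases hpre with ⟨hh, hw⟩ | ⟨-, hm⟩
      · exact lt_of_lt_of_le zero_lt_one (le_trans hh (le_max_left h_ w))
      · exact hm
    have hneg : max h_ w * n < 0 := mul_neg_of_pos_of_neg hmax hn
    have hB : pvLoopB n h_ w 1 [] = [] := by
      rw [pvLoopB, dif_neg (by norm_num; omega)]
    rw [rec_in_sq, rec_in_sq_alt, hB, pvLoopA, dif_neg (by omega)]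
    rw [(PySem.List.min?_eq_none_iff ([] : List Int) (fun s => s)).mpr rfl]
  · obtain ⟨hh, hw⟩ : 1 ≤ h_ ∧ 1 ≤ w := by
      rcases hpre with hp | ⟨hp, -⟩
      · exact hp
      · omega
    obtain ⟨c, hcstep, hchi⟩ := exists_step1 hn hh hw
    have hcL : c ∈ pvLoopB n h_ w 1 [] :=
      (pvLoopB_mem n h_ w 1 [] c le_rfl).mpr (Or.inr ⟨1, le_rfl, by norm_num; omega, hcstep⟩)
    cases hmin : PySem.List.min? (pvLoopB n h_ w 1 []) (fun s => s) with
    | none =>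
      rw [PySem.List.min?_eq_none_iff] at hmin
      rw [hmin] at hcL
      simp at hcL
    | some m =>
      have halt : rec_in_sq_alt n h_ w = m := by
        simp only [rec_in_sq_alt, hmin]
      obtain ⟨hm0, hmg⟩ := mem_loopB_facts hn hh hw (PySem.List.min?_mem hmin)
      have hmc : m ≤ c := PySem.List.min?_isMin hmin c hcL
      have hmin_le : ∀ s, 0 ≤ s → pvGood s n h_ w = true → m ≤ s := by
        rcases (by omega : n = 0 ∨ 1 ≤ n) with rfl | hn1
        · intro s hs _
          have : max h_ w * 0 = 0 := by ring
          omega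
        · exact alt_min hn1 hh hw hmin
      have hchar : ∀ s, 0 ≤ s → (pvGood s n h_ w = true ↔ m ≤ s) := by
        intro s hs
        exact ⟨fun hg => hmin_le s hs hg, fun hle => pvGood_mono hh hw hm0 hle hmg⟩
      rw [rec_in_sq, halt]
      exact pvLoopA_eq n h_ w m hm0 hchar 0 (max h_ w * n) (-1)
        le_rfl hm0 (Or.inl ⟨rfl, by omega⟩)
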